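-- pv_equiv track=rewrite | github.com/rodnucaf/Algoritmos-y-Estructuras-de-Datos-1-Intro-programaci-n | Python (Imperativo, Parcial y Trabajo Práctico)/Solución.py | armarTodasLasSubsecs
-- ===== SOURCE A (Python) =====
-- def armarTodasLasSubsecs(l:list[int])->list[list[int]]:
--
-- 	desde:int = len(l) -1
-- 	hasta:int = 0 #el índice 0 de la lista, ya que en la función armarSubsecDesdeHasta le voy a restar 1
-- 	res:list[list[int]] = []
-- 	for i in range (desde, hasta-1,-1):
--
-- 		for j in range (desde, hasta-1,-1):
--
-- 			subsec:list[int] = armarSubsecDesdeHasta(l,i,j)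
-- 			res.append(subsec)
--
-- 	return res
--
-- def armarSubsecDesdeHasta(l:list[int], n:int, m:int)->list[int]:
-- 	lista:list[int] = []
-- 	for i in range (n, m-1, -1):
-- 		lista.append(l[i])
--
-- 	return lista
-- ===== SOURCE B (Python) =====
-- def armarTodasLasSubsecs(l: list[int]) -> list[list[int]]:
--     n = len(l)
--     res: list[list[int]] = []
--     for i in range(n - 1, -1, -1):
--         acc: list[int] = []
--         for j in range(n - 1, -1, -1):
--             if j > i:
--                 res.append([])
--             else:
--                 acc.append(l[j])
--                 res.append(acc.copy())
--     return res
-- ===== Notes on version B (the rewrite author's own statement) =====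
-- stated objective: alternative
-- what changed: Instead of calling a helper that rescans l[i..j] from scratch for every index pair, B keeps one running accumulator per outer index and extends it by one element per inner step, copying it into the result; the helper and its inner rescan loop disappear.
import Mathlib
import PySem

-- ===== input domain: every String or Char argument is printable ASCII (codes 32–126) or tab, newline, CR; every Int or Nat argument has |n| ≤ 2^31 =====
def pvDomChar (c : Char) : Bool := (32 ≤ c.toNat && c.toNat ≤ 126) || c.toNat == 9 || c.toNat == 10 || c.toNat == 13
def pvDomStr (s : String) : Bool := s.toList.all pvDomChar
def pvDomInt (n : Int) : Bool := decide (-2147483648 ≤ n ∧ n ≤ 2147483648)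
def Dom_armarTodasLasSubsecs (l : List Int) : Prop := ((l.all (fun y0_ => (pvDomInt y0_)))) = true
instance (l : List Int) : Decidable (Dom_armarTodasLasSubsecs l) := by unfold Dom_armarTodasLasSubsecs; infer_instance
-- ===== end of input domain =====

-- B replaces A's per-pair helper rescan by one running accumulator per outer index,
-- extended by one element per inner step (alternative decomposition, same output order).

-- ===== PORT A =====
-- helper armarSubsecDesdeHasta: for i in range(n, m-1, -1): lista.append(l[i])
def armarSubsecDesdeHasta (l : List Int) (n m : Int) : List Int :=
  (PySem.List.pyRange n (m - 1) (-1)).foldl (fun lista i => lista ++ [PySem.List.pyGetD l i 0]) []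

def armarTodasLasSubsecs (l : List Int) : List (List Int) :=
  let desde : Int := (l.length : Int) - 1
  (PySem.List.pyRange desde (-1) (-1)).foldl (fun res i =>
    (PySem.List.pyRange desde (-1) (-1)).foldl (fun res j =>
      res ++ [armarSubsecDesdeHasta l i j]) res) []

-- ===== PORT B =====
def armarTodasLasSubsecs_alt (l : List Int) : List (List Int) :=
  let n : Int := (l.length : Int)
  (PySem.List.pyRange (n - 1) (-1) (-1)).foldl (fun res i =>
    ((PySem.List.pyRange (n - 1) (-1) (-1)).foldl
      (fun (st : List Int × List (List Int)) j =>
        if j > i then (st.1, st.2 ++ [[]])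
        else (st.1 ++ [PySem.List.pyGetD l j 0], st.2 ++ [st.1 ++ [PySem.List.pyGetD l j 0]]))
      ([], res)).2) []

-- ===== PRECONDITION & SPEC =====
def Spec_armarTodasLasSubsecs (l : List Int) (out : List (List Int)) : Prop := out = armarTodasLasSubsecs_alt l
instance (l : List Int) (out : List (List Int)) : Decidable (Spec_armarTodasLasSubsecs l out) := by unfold Spec_armarTodasLasSubsecs; infer_instance

-- ===== CLAIM (what is proved, stated in full; the proofs are below) =====
def Claim_equal_armarTodasLasSubsecs : Prop := ∀ (l : List Int), Dom_armarTodasLasSubsecs l → Spec_armarTodasLasSubsecs l (armarTodasLasSubsecs l)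

-- ===== LEMMAS AND PROOFS =====

-- A's helper, as a map over the countdown range.
theorem sub_eq_map (l : List Int) (n m : Int) :
    armarSubsecDesdeHasta l n m =
      (PySem.List.pyRange n (m - 1) (-1)).map (fun i => PySem.List.pyGetD l i 0) := by
  unfold armarSubsecDesdeHasta
  exact PySem.List.foldl_append_singleton_eq_map _ _ _

theorem sub_empty (l : List Int) {i j : Int} (h : i < j) :
    armarSubsecDesdeHasta l i j = [] := by
  rw [sub_eq_map, PySem.List.pyRange_neg_one_eq_nil (by omega)]
  rfl

-- Extending the subsequence by one more (smaller) index.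
theorem sub_succ (l : List Int) {i j : Int} (hij : j ≤ i) :
    armarSubsecDesdeHasta l i j = armarSubsecDesdeHasta l i (j + 1) ++ [PySem.List.pyGetD l j 0] := by
  rw [sub_eq_map, sub_eq_map]
  have hsplit : PySem.List.pyRange i (j - 1) (-1) = PySem.List.pyRange i j (-1) ++ [j] := by
    rw [PySem.List.pyRange_neg_one_eq_reverse, PySem.List.pyRange_neg_one_eq_reverse,
        show j - 1 + 1 = j by ring, PySem.List.pyRange_one_cons (by omega : j < i + 1)]
    simp
  rw [hsplit]
  simp [add_sub_cancel_right]

-- Invariant of B's inner loop: while counting down from t-1, the accumulator is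
-- exactly A's subsequence from i down to t, and each step emits A's subsequence.
theorem Binner (l : List Int) (i : Int) :
    ∀ (t : Nat) (res : List (List Int)),
      ((PySem.List.pyRange ((t : Int) - 1) (-1) (-1)).foldl
        (fun (st : List Int × List (List Int)) j =>
          if j > i then (st.1, st.2 ++ [[]])
          else (st.1 ++ [PySem.List.pyGetD l j 0], st.2 ++ [st.1 ++ [PySem.List.pyGetD l j 0]]))
        (armarSubsecDesdeHasta l i (t : Int), res)).2
      = res ++ (PySem.List.pyRange ((t : Int) - 1) (-1) (-1)).map
          (fun j => armarSubsecDesdeHasta l i j) := by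
  intro t
  induction t with
  | zero =>
    intro res
    rw [PySem.List.pyRange_neg_one_eq_nil (by omega)]
    simp
  | succ t ih =>
    intro res
    have hcons : PySem.List.pyRange ((t : Int) + 1 - 1) (-1) (-1)
        = (t : Int) :: PySem.List.pyRange ((t : Int) - 1) (-1) (-1) := by
      rw [show (t : Int) + 1 - 1 = (t : Int) by ring]
      exact PySem.List.pyRange_neg_one_cons (by omega)
    push_cast
    rw [hcons]
    simp only [List.foldl_cons, List.map_cons]
    by_cases hti : (t : Int) > i
    · rw [if_pos hti]
      have hacc1 : armarSubsecDesdeHasta l i ((t : Int) + 1) = [] := sub_empty l (by omega)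
      have hacc2 : armarSubsecDesdeHasta l i (t : Int) = [] := sub_empty l hti
      rw [hacc1]
      have hih := ih (res ++ [[]])
      rw [hacc2] at hih
      rw [hih]
      simp [hacc2]
    · rw [if_neg hti]
      have hstep : armarSubsecDesdeHasta l i (t : Int)
          = armarSubsecDesdeHasta l i ((t : Int) + 1) ++ [PySem.List.pyGetD l (t : Int) 0] :=
        sub_succ l (by omega)
      rw [← hstep, ih (res ++ [armarSubsecDesdeHasta l i (t : Int)])]
      simp

-- ===== VERDICT (by name: the statement is the Claim_ definition above) =====
theorem armarTodasLasSubsecs_spec : Claim_equal_armarTodasLasSubsecs := by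
  intro l _
  unfold Spec_armarTodasLasSubsecs armarTodasLasSubsecs armarTodasLasSubsecs_alt
  apply Eq.symm
  apply PySem.List.foldl_congr_mem
  intro res i hi
  have hmem := (PySem.List.mem_pyRange_neg_one).1 hi
  have hstart : armarSubsecDesdeHasta l i (l.length : Int) = [] :=
    sub_empty l (by omega)
  have h := Binner l i l.length res
  rw [hstart] at h
  rw [h, PySem.List.foldl_append_singleton_eq_map (fun j => armarSubsecDesdeHasta l i j)]
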